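-- pv_equiv track=rewrite | github.com/Arsen1302/Code-copy-detector | TestData/solutions/problem_1617_2.py | solution_1617_2
-- ===== SOURCE A (Python) =====
-- from typing import List
--
-- def solution_1617_2(nums: List[int]) -> List[int]:
-- 	pairs = 0
-- 	single = set()
--
-- 	for num in nums:
-- 		if num in single:
-- 			single.remove(num)
-- 			pairs += 1
-- 		else:
-- 			single.add(num)
--
-- 	return [pairs, len(single)]
-- ===== SOURCE B (Python) =====
-- from typing import List
--
-- def solution_1617_2(nums: List[int]) -> List[int]:
-- 	counts = {}
-- 	for num in nums:
-- 		counts[num] = counts.get(num, 0) + 1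
-- 	pairs = sum(c // 2 for c in counts.values())
-- 	singles = sum(c % 2 for c in counts.values())
-- 	return [pairs, singles]
-- ===== Notes on version B (the rewrite author's own statement) =====
-- stated objective: alternative
-- what changed: Replaces the single-pass set-toggling (add/remove with a pairs counter) by a frequency map built first and a separate arithmetic pass computing sum(c//2) and sum(c%2) over the counts.
import Mathlib
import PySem

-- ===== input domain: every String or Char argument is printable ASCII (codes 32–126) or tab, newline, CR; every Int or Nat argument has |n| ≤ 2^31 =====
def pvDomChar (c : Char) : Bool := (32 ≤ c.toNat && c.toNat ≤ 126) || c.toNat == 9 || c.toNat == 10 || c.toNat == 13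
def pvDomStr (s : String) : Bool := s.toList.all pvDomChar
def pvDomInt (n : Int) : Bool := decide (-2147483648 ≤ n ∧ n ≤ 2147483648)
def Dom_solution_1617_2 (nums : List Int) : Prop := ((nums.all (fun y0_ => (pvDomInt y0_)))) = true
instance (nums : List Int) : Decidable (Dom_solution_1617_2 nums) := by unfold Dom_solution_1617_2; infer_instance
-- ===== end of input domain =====

-- B replaces A's one-pass set-toggling by a frequency map plus an arithmetic pass (sum of c//2 and c%2); alternative decomposition, same cost.

-- ===== PORT A =====
-- loop body of A's for-loop; 'single.remove(num)' runs only under 'num in single', where it equals discard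
def pvStepA (st : Int × PySem.Set Int) (num : Int) : Int × PySem.Set Int :=
  if PySem.Set.contains st.2 num then
    (st.1 + 1, PySem.Set.discard st.2 num)
  else
    (st.1, PySem.Set.add st.2 num)

def solution_1617_2 (nums : List Int) : List Int :=
  let st := nums.foldl pvStepA (0, PySem.Set.empty)
  [st.1, PySem.Set.len st.2]

-- ===== PORT B =====
def solution_1617_2_alt (nums : List Int) : List Int :=
  let counts := nums.foldl (fun (d : PySem.Dict Int Int) num => d.insert num (d.getD num 0 + 1)) PySem.Dict.empty
  let pairs := (counts.values.map (fun c => PySem.Int.floordiv c 2)).sum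
  let singles := (counts.values.map (fun c => PySem.Int.mod c 2)).sum
  [pairs, singles]

-- ===== PRECONDITION & SPEC =====
def Spec_solution_1617_2 (nums : List Int) (out : List Int) : Prop := out = solution_1617_2_alt nums
instance (nums : List Int) (out : List Int) : Decidable (Spec_solution_1617_2 nums out) := by unfold Spec_solution_1617_2; infer_instance

-- ===== CLAIM (what is proved, stated in full; the proofs are below) =====
def Claim_equal_solution_1617_2 : Prop := ∀ (nums : List Int), Dom_solution_1617_2 nums → Spec_solution_1617_2 nums (solution_1617_2 nums)

-- ===== LEMMAS AND PROOFS =====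

-- removing a present element from a duplicate-free set shrinks it by one
lemma pv_discard_len (s : PySem.Set Int) (a : Int) (h : s.Nodup) (ha : a ∈ s) :
    (PySem.Set.discard s a).length + 1 = s.length := by
  have he : List.filter (fun y => !y == a) s = s.erase a := by
    rw [List.Nodup.erase_eq_filter h]
    congr 1
  have : (s.erase a).length = s.length - 1 := List.length_erase_of_mem ha
  have hlen : 1 ≤ s.length := List.length_pos_of_mem ha
  simp only [PySem.Set.discard, he, this]
  omega

-- invariant of A's toggling loop: the set holds exactly the odd-count elements (relative to the
-- starting set), stays duplicate-free, and 2·pairs + |single| grows by one per element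
lemma pv_loopA_inv (l : List Int) : ∀ (p : Int) (s : PySem.Set Int), s.Nodup →
    (l.foldl pvStepA (p, s)).2.Nodup ∧
    (∀ x : Int, x ∈ (l.foldl pvStepA (p, s)).2 ↔
        ((x ∈ s ∧ l.count x % 2 = 0) ∨ (x ∉ s ∧ l.count x % 2 = 1))) ∧
    2 * (l.foldl pvStepA (p, s)).1 + ((l.foldl pvStepA (p, s)).2.length : Int)
      = 2 * p + (s.length : Int) + (l.length : Int) := by
  induction l with
  | nil =>
    intro p s hs
    refine ⟨hs, ?_, by simp⟩
    intro x
    simp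
  | cons a t ih =>
    intro p s hs
    by_cases hc : PySem.Set.contains s a = true
    · have ha : a ∈ s := (PySem.Set.contains_iff s a).1 hc
      have hstep : pvStepA (p, s) a = (p + 1, PySem.Set.discard s a) := by
        simp [pvStepA, ha]
      have hnd : (PySem.Set.discard s a).Nodup := PySem.Set.nodup_discard s a hs
      obtain ⟨h1, h2, h3⟩ := ih (p + 1) (PySem.Set.discard s a) hnd
      have hlen := pv_discard_len s a hs ha
      refine ⟨by simpa [hstep] using h1, ?_, ?_⟩
      · intro x
        rw [List.foldl_cons, hstep]
        rw [h2 x]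
        by_cases hx : x = a
        · subst hx
          simp [PySem.Set.mem_discard, ha]
          omega
        · have hax : ¬ a = x := fun h => hx h.symm
          simp [PySem.Set.mem_discard, hx, hax]
      · rw [List.foldl_cons, hstep]
        simp only [List.length_cons]
        omega
    · have ha : a ∉ s := fun h => hc ((PySem.Set.contains_iff s a).2 h)
      have hstep : pvStepA (p, s) a = (p, s ++ [a]) := by
        simp [pvStepA, ha]
      have hnd : (s ++ [a]).Nodup := by
        simp [List.nodup_append, hs]
        exact fun b hb h => ha (h ▸ hb)
      obtain ⟨h1, h2, h3⟩ := ih p (s ++ [a]) hnd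
      refine ⟨by simpa [hstep] using h1, ?_, ?_⟩
      · intro x
        rw [List.foldl_cons, hstep]
        rw [h2 x]
        by_cases hx : x = a
        · subst hx
          simp [ha]
          omega
        · have hax : ¬ a = x := fun h => hx h.symm
          simp [hx, hax]
      · rw [List.foldl_cons, hstep]
        simp only [List.length_cons, List.length_append, List.length_nil] at h3 ⊢
        omega

-- Nat-side arithmetic over any key list L: 2·Σ(f/2) + Σ(f%2) = Σ f, and Σ(f%2) counts the odd keys
lemma pv_sum_div_mod (f : Int → Nat) (L : List Int) :
    2 * (L.map (fun k => f k / 2)).sum + (L.map (fun k => f k % 2)).sum = (L.map f).sum ∧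
    (L.map (fun k => f k % 2)).sum = L.countP (fun k => f k % 2 == 1) := by
  induction L with
  | nil => simp
  | cons a t ih =>
    obtain ⟨i1, i2⟩ := ih
    constructor
    · simp only [List.map_cons, List.sum_cons]
      omega
    · simp only [List.map_cons, List.sum_cons, List.countP_cons, i2]
      by_cases h : f a % 2 = 1 <;> simp [h] <;> omega

-- the counts in Counter(nums) sum to the length of nums
lemma pv_sum_counts (nums : List Int) :
    ((PySem.Set.ofList nums).map (fun k => List.count k nums)).sum = nums.length := by
  have hperm : (PySem.Set.ofList nums).Perm nums.dedup :=
    (List.perm_ext_iff_of_nodup (PySem.Set.nodup_ofList nums) nums.nodup_dedup).2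
      (fun x => by simp [PySem.Set.mem_ofList, List.mem_dedup])
  rw [(hperm.map (fun k => List.count k nums)).sum_eq]
  exact List.sum_map_count_dedup_eq_length nums

-- ===== VERDICT (by name: the statement is the Claim_ definition above) =====
theorem solution_1617_2_spec : Claim_equal_solution_1617_2 := by
  intro nums _
  unfold Spec_solution_1617_2
  -- B's counting loop is Counter(nums)
  simp only [solution_1617_2, solution_1617_2_alt,
    PySem.Dict.foldl_insert_getD_add_one_eq_counter]
  have hvals : (PySem.Dict.counter nums).values = (PySem.Set.ofList nums).map (fun k => (List.count k nums : Int)) := by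
    simp [PySem.Dict.values, PySem.Dict.items_counter, List.map_map, Function.comp_def]
  have hdiv : ∀ m : Nat, PySem.Int.floordiv (m : Int) 2 = ((m / 2 : Nat) : Int) := by
    intro m; exact_mod_cast PySem.Int.floordiv_natCast m 2
  have hmod : ∀ m : Nat, PySem.Int.mod (m : Int) 2 = ((m % 2 : Nat) : Int) := by
    intro m; exact_mod_cast PySem.Int.mod_natCast m 2
  -- B's two sums, cast to Nat sums
  have hpairsB : ((PySem.Dict.counter nums).values.map (fun c => PySem.Int.floordiv c 2)).sum
      = (((PySem.Set.ofList nums).map (fun k => List.count k nums / 2)).sum : Nat) := by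
    rw [hvals, List.map_map]
    rw [Nat.cast_list_sum, List.map_map]
    congr 1
    exact List.map_congr_left (fun k _ => hdiv (List.count k nums))
  have hsinglesB : ((PySem.Dict.counter nums).values.map (fun c => PySem.Int.mod c 2)).sum
      = (((PySem.Set.ofList nums).map (fun k => List.count k nums % 2)).sum : Nat) := by
    rw [hvals, List.map_map]
    rw [Nat.cast_list_sum, List.map_map]
    congr 1
    exact List.map_congr_left (fun k _ => hmod (List.count k nums))
  -- A's loop invariant at the initial state
  obtain ⟨hnd, hmem, hcount⟩ := pv_loopA_inv nums 0 (PySem.Set.empty) List.nodup_nil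
  set st := nums.foldl pvStepA (0, PySem.Set.empty) with hst
  -- A's final set is a permutation of the odd-count keys of D
  have hmem' : ∀ x : Int, x ∈ st.2 ↔ (List.count x nums % 2 = 1) := by
    intro x
    rw [hmem x]
    simp [PySem.Set.empty]
  have hpermfin : st.2.Perm ((PySem.Set.ofList nums).filter (fun k => List.count k nums % 2 == 1)) := by
    refine (List.perm_ext_iff_of_nodup hnd ((PySem.Set.nodup_ofList nums).filter _)).2 ?_
    intro x
    rw [hmem']
    simp only [List.mem_filter, PySem.Set.mem_ofList, beq_iff_eq]
    constructor
    · intro h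
      have hxmem : x ∈ nums := List.count_pos_iff.1 (by omega)
      exact ⟨hxmem, h⟩
    · exact fun h => h.2
  obtain ⟨hsum1, hsum2⟩ := pv_sum_div_mod (fun k => List.count k nums) (PySem.Set.ofList nums)
  have hK1 := pv_sum_counts nums
  have hlenfin : st.2.length = ((PySem.Set.ofList nums).map (fun k => List.count k nums % 2)).sum := by
    rw [hpermfin.length_eq, ← List.countP_eq_length_filter, hsum2]
  -- assemble: the singles entries agree, and the pairs entries follow by arithmetic
  rw [hpairsB, hsinglesB]
  have hc := hcount
  rw [hlenfin] at hc
  simp only [PySem.Set.empty, List.length_nil, Nat.cast_zero] at hc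
  have h1 : st.1 = (((PySem.Set.ofList nums).map (fun k => List.count k nums / 2)).sum : Nat) := by omega
  simp only [PySem.Set.len, h1, hlenfin]
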